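-- pv_equiv track=rewrite | github.com/Sovik89/Scaler_inter_n_advanced | advanced_string_permutation_of_a_in_b.py | solve
-- ===== SOURCE A (Python) =====
-- def solve(A, B):
--
--     n=len(A)
--     m=len(B)
--     count=0
--     #len of A is less than len of B
--
--     hash_map_A=dict()
--     hash_map_B=dict()
--     for i in range(n):
--         if A[i] in hash_map_A:
--
--             hash_map_A[A[i]]+=1
--         else:
--             hash_map_A[A[i]]=1
--         if B[i] in hash_map_B:
--             hash_map_B[B[i]]+=1
--         else:
--             hash_map_B[B[i]]=1
--
--     if hash_map_A == hash_map_B: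
--         count+=1
--
--     i=1
--     for j in range(n,m):
--         if B[j] in hash_map_B:
--             hash_map_B[B[j]]+=1
--         else:
--             hash_map_B[B[j]]=1
--
--         if hash_map_B[B[i-1]] > 1:
--             hash_map_B[B[i-1]]-=1
--         else:
--             del hash_map_B[B[i-1]]
--
--         if hash_map_A == hash_map_B:#compare function
--             count+=1
--         i+=1
--
--     return count
-- ===== SOURCE B (Python) =====
-- def solve(A, B):
--     n, m = len(A), len(B)
--     # diff[c] = (count of c in current window of B) - (count of c in A); a window is an anagram of A iff no entry is nonzero
--     diff = {}
--     for c in A: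
--         diff[c] = diff.get(c, 0) - 1
--     mismatch = sum(1 for v in diff.values() if v != 0)
--
--     def shift(c, delta):
--         nonlocal mismatch
--         old = diff.get(c, 0)
--         new = old + delta
--         if old == 0:
--             mismatch += 1
--         elif new == 0:
--             mismatch -= 1
--         diff[c] = new
--
--     for c in B[:n]:
--         shift(c, 1)
--     count = 1 if mismatch == 0 else 0
--     for j in range(n, m):
--         shift(B[j], 1)
--         shift(B[j - n], -1)
--         if mismatch == 0:
--             count += 1
--     return count
-- ===== Notes on version B (the rewrite author's own statement) =====
-- stated objective: alternative
-- what changed: Instead of rebuilding and comparing whole frequency dicts at every window position, B maintains one signed difference dict (window count minus A's count) and an incrementally maintained mismatch counter; a window is an anagram iff mismatch == 0.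
import Mathlib
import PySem

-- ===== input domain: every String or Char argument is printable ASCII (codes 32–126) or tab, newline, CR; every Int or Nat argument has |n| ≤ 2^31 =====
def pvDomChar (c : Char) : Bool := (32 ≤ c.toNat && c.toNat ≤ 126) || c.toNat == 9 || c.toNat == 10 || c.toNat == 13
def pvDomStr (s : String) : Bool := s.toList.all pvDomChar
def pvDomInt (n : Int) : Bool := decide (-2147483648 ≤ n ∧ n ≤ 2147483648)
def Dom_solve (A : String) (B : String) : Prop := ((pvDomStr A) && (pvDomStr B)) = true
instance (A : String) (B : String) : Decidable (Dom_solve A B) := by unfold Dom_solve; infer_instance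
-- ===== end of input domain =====

-- B replaces A's per-window full dict comparison by one signed difference dict with an
-- incrementally maintained mismatch counter (a window matches iff mismatch == 0).

-- ===== PORT A =====
-- Python dict equality `hash_map_A == hash_map_B` ignores insertion order: compare as mappings.
def pvDictEq (d e : PySem.Dict Char Int) : Bool :=
  d.keys.all (fun k => d.get? k == e.get? k) && e.keys.all (fun k => d.get? k == e.get? k)


-- `if c in d: d[c] += 1 else: d[c] = 1`
def pvBump (d : PySem.Dict Char Int) (c : Char) : PySem.Dict Char Int :=
  if d.contains c then d.insert c (d.getD c 0 + 1) else d.insert c 1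
def pvDrop (d : PySem.Dict Char Int) (c : Char) : PySem.Dict Char Int :=
  if d.getD c 0 > 1 then d.insert c (d.getD c 0 - 1) else d.erase c

-- one iteration of A's sliding loop: add B[j], remove B[i-1], compare the two dicts
def pvStepA (hA : PySem.Dict Char Int) (st : PySem.Dict Char Int × Int) (cc : Char × Char) :
    PySem.Dict Char Int × Int :=
  let d := pvDrop (pvBump st.1 cc.1) cc.2
  (d, if pvDictEq hA d then st.2 + 1 else st.2)

def solve (A : String) (B : String) : Int :=
  let as := A.toList
  let bs := B.toList
  -- first loop: for i in range(n): bump A[i] into hash_map_A and B[i] into hash_map_B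
  let hs := (as.zip bs).foldl (fun p ab => (pvBump p.1 ab.1, pvBump p.2 ab.2))
              (PySem.Dict.empty, PySem.Dict.empty)
  let count0 : Int := if pvDictEq hs.1 hs.2 then 1 else 0
  -- for j in range(n, m): the pair (B[j], B[i-1]) with i-1 = j-n
  let r := (List.zip (bs.drop as.length) bs).foldl (pvStepA hs.1) (hs.2, count0)
  r.2

-- ===== PORT B =====
-- shift(c, delta): update diff[c] and the mismatch counter
def pvShift (st : PySem.Dict Char Int × Int) (c : Char) (delta : Int) :
    PySem.Dict Char Int × Int :=
  let old := st.1.getD c 0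
  let new := old + delta
  let mis := if old = 0 then st.2 + 1 else if new = 0 then st.2 - 1 else st.2
  (st.1.insert c new, mis)


-- one iteration of B's sliding loop: shift(B[j], 1); shift(B[j-n], -1); count if mismatch == 0
def pvStepB (p : (PySem.Dict Char Int × Int) × Int) (cc : Char × Char) :
    (PySem.Dict Char Int × Int) × Int :=
  let st := pvShift (pvShift p.1 cc.1 1) cc.2 (-1)
  (st, if st.2 = 0 then p.2 + 1 else p.2)

def solve_alt (A : String) (B : String) : Int :=
  let as := A.toList
  let bs := B.toList
  let n := as.length
  let diff0 := as.foldl (fun d c => d.insert c (d.getD c 0 - 1)) PySem.Dict.empty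
  let mis0 : Int := ((diff0.values.filter (fun v => !(v == 0))).length : Int)
  let st1 := (bs.take n).foldl (fun st c => pvShift st c 1) (diff0, mis0)
  let count0 : Int := if st1.2 = 0 then 1 else 0
  let r := (List.zip (bs.drop n) bs).foldl pvStepB (st1, count0)
  r.2

-- ===== PRECONDITION & SPEC =====
-- A indexes B[i] for every i < len(A), so it raises IndexError unless len(A) ≤ len(B).
def Pre_solve (A : String) (B : String) : Prop := A.toList.length ≤ B.toList.length
instance (A : String) (B : String) : Decidable (Pre_solve A B) := by unfold Pre_solve; infer_instance
def pvWitness_solve : String × String := ("ab", "xba")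

def Spec_solve (A : String) (B : String) (out : Int) : Prop := out = solve_alt A B
instance (A : String) (B : String) (out : Int) : Decidable (Spec_solve A B out) := by unfold Spec_solve; infer_instance

-- ===== CLAIM (what is proved, stated in full; the proofs are below) =====
def Claim_equal_solve : Prop := ∀ (A : String) (B : String), Dom_solve A B → Pre_solve A B → Spec_solve A B (solve A B)

-- ===== LEMMAS AND PROOFS =====

def HBInv (d : PySem.Dict Char Int) (g : Char → Int) : Prop :=
  d.keys.Nodup ∧ (∀ c, 0 ≤ g c) ∧ (∀ c, d.get? c = if g c = 0 then none else some (g c))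

lemma get?_erase_self (d : PySem.Dict Char Int) (c : Char) : (d.erase c).get? c = none := by
  simp only [PySem.Dict.erase, PySem.Dict.get?]
  have : List.find? (fun p => p.1 == c) (d.items.filter (fun p => !(p.1 == c))) = none := by
    rw [List.find?_eq_none]
    intro x hx
    simpa using (List.mem_filter.mp hx).2
  rw [this]; rfl

lemma get?_erase_of_ne (d : PySem.Dict Char Int) {x c : Char} (h : x ≠ c) :
    (d.erase c).get? x = d.get? x := by
  simp only [PySem.Dict.erase, PySem.Dict.get?, List.find?_filter]
  have hp : (fun (a : Char × Int) => decide ((!(a.1 == c)) = true ∧ (a.1 == x) = true)) =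
      (fun (a : Char × Int) => a.1 == x) := by
    funext a
    by_cases hax : a.1 = x
    · simp [hax, h]
    · simp [hax]
  rw [hp]

lemma keys_erase (d : PySem.Dict Char Int) (c : Char) :
    (d.erase c).keys = d.keys.filter (fun k => !(k == c)) := by
  show (d.items.filter _).map Prod.fst = (d.items.map Prod.fst).filter _
  induction d.items with
  | nil => rfl
  | cons a l ih => by_cases hac : a.1 = c <;> simp [List.filter_cons, hac, ih]

lemma HBInv_bump {d : PySem.Dict Char Int} {g : Char → Int} (h : HBInv d g) (c : Char) :
    HBInv (pvBump d c) (fun x => if x = c then g x + 1 else g x) := by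
  obtain ⟨hnd, hnn, hg⟩ := h
  unfold pvBump
  by_cases hc : d.contains c = true
  · have hmem : c ∈ d.keys := (PySem.Dict.contains_iff_mem_keys d c).mp hc
    have hne : g c ≠ 0 := fun h0 =>
      ((PySem.Dict.get?_eq_none_iff_not_mem_keys d c).mp (by rw [hg c, if_pos h0])) hmem
    have hgetD : d.getD c 0 = g c := by
      rw [PySem.Dict.getD_eq_get?_getD, hg c, if_neg hne]; rfl
    rw [if_pos hc]
    refine ⟨by rw [PySem.Dict.keys_insert_of_contains d _ hc]; exact hnd, ?_, ?_⟩
    · intro x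
      by_cases hxc : x = c
      · simp [hxc]; have := hnn c; omega
      · simp [hxc]; exact hnn x
    · intro x
      rw [PySem.Dict.get?_insert]
      by_cases hxc : x = c
      · have hne1 : g c + 1 ≠ 0 := by have := hnn c; omega
        simp [hxc, hgetD, hne1]
      · simp [hxc, hg x]
  · have hc' : d.contains c = false := by simpa using hc
    have hnone : d.get? c = none := (PySem.Dict.get?_eq_none_iff_contains d c).mpr hc'
    have hg0 : g c = 0 := by
      by_contra h0
      rw [hg c, if_neg h0] at hnone
      simp at hnone
    have hnmem : c ∉ d.keys := (PySem.Dict.get?_eq_none_iff_not_mem_keys d c).mp hnone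
    rw [if_neg hc]
    refine ⟨?_, ?_, ?_⟩
    · rw [PySem.Dict.keys_insert_of_not_contains d _ hc']
      rw [List.nodup_append]
      refine ⟨hnd, by simp, ?_⟩
      intro x hx y hy
      rw [List.mem_singleton] at hy
      subst hy
      exact fun hxy => hnmem (hxy ▸ hx)
    · intro x
      by_cases hxc : x = c
      · simp [hxc]; have := hnn c; omega
      · simp [hxc]; exact hnn x
    · intro x
      rw [PySem.Dict.get?_insert]
      by_cases hxc : x = c
      · simp [hxc, hg0]
      · simp [hxc, hg x]

lemma HBInv_drop {d : PySem.Dict Char Int} {g : Char → Int} (h : HBInv d g) {c : Char}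
    (hc : 1 ≤ g c) : HBInv (pvDrop d c) (fun x => if x = c then g x - 1 else g x) := by
  obtain ⟨hnd, hnn, hg⟩ := h
  have hne : g c ≠ 0 := by omega
  have hgetD : d.getD c 0 = g c := by
    rw [PySem.Dict.getD_eq_get?_getD, hg c, if_neg hne]; rfl
  unfold pvDrop
  by_cases h1 : d.getD c 0 > 1
  · have hcont : d.contains c = true := by
      rw [PySem.Dict.contains_eq_isSome_get?, hg c, if_neg hne]; rfl
    rw [if_pos h1]
    rw [hgetD] at h1
    refine ⟨by rw [PySem.Dict.keys_insert_of_contains d _ hcont]; exact hnd, ?_, ?_⟩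
    · intro x
      by_cases hxc : x = c
      · simp [hxc]; omega
      · simp [hxc]; exact hnn x
    · intro x
      rw [PySem.Dict.get?_insert]
      by_cases hxc : x = c
      · have hne1 : g c - 1 ≠ 0 := by omega
        simp [hxc, hgetD, hne1]
      · simp [hxc, hg x]
  · have hgc1 : g c = 1 := by rw [hgetD] at h1; omega
    rw [if_neg h1]
    refine ⟨?_, ?_, ?_⟩
    · rw [keys_erase]; exact hnd.filter _
    · intro x
      by_cases hxc : x = c
      · simp [hxc]; omega
      · simp [hxc]; exact hnn x
    · intro x
      by_cases hxc : x = c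
      · rw [hxc, get?_erase_self]
        simp [hgc1]
      · rw [get?_erase_of_ne d hxc]
        simp [hxc, hg x]

def IDInv (d : PySem.Dict Char Int) (mis : Int) (f : Char → Int) : Prop :=
  d.keys.Nodup ∧ (∀ c, d.getD c 0 = f c) ∧ (∀ c, c ∉ d.keys → f c = 0) ∧
    mis = ((d.keys.filter (fun k => !(d.getD k 0 == 0))).length : Int)

lemma dictEq_iff {d e : PySem.Dict Char Int} {g h : Char → Int}
    (hd : HBInv d g) (he : HBInv e h) : (pvDictEq d e = true ↔ ∀ c, g c = h c) := by
  obtain ⟨-, -, hdg⟩ := hd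
  obtain ⟨-, -, heh⟩ := he
  unfold pvDictEq
  rw [Bool.and_eq_true, List.all_eq_true, List.all_eq_true]
  constructor
  · rintro ⟨h1, h2⟩ c
    by_cases hg0 : g c = 0
    · by_cases hh0 : h c = 0
      · rw [hg0, hh0]
      · have hck : c ∈ e.keys := by
          by_contra hnc
          have := (PySem.Dict.get?_eq_none_iff_not_mem_keys e c).mpr hnc
          rw [heh c, if_neg hh0] at this
          simp at this
        have := h2 c hck
        rw [hdg c, heh c, if_pos hg0, if_neg hh0] at this
        simp at this
    · have hck : c ∈ d.keys := by
        by_contra hnc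
        have := (PySem.Dict.get?_eq_none_iff_not_mem_keys d c).mpr hnc
        rw [hdg c, if_neg hg0] at this
        simp at this
      have := h1 c hck
      rw [hdg c, heh c, if_neg hg0] at this
      by_cases hh0 : h c = 0
      · rw [if_pos hh0] at this; simp at this
      · rw [if_neg hh0] at this; simpa using this
  · intro hgh
    have key : ∀ c, d.get? c = e.get? c := by
      intro c; rw [hdg c, heh c, hgh c]
    constructor <;> intro c _ <;> simp [key c]

lemma filter_length_update :
    ∀ (l : List Char), l.Nodup → ∀ {c : Char}, c ∈ l → ∀ (p p' : Char → Bool),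
      (∀ x, x ≠ c → p' x = p x) →
      ((l.filter p').length : Int) =
        (l.filter p).length + (if p' c then 1 else 0) - (if p c then 1 else 0) := by
  intro l
  induction l with
  | nil => intro _ c hc; exact absurd hc (List.not_mem_nil)
  | cons a l ih =>
    intro hnd c hc p p' hpp
    have hal : a ∉ l := (List.nodup_cons.mp hnd).1
    have hndl : l.Nodup := (List.nodup_cons.mp hnd).2
    rcases List.mem_cons.mp hc with hca | hcl
    · subst hca
      have hfil : l.filter p' = l.filter p :=
        List.filter_congr (fun x hx => hpp x (fun hxa => hal (hxa ▸ hx)))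
      rw [List.filter_cons, List.filter_cons, hfil]
      by_cases h1 : p' c <;> by_cases h2 : p c <;> simp [h1, h2] <;> push_cast <;> omega
    · have hac : a ≠ c := fun he => hal (he ▸ hcl)
      have := ih hndl hcl p p' hpp
      rw [List.filter_cons, List.filter_cons, hpp a hac]
      by_cases h2 : p a <;> simp [h2] <;> push_cast at this ⊢ <;> omega

lemma HBInv_congr {d : PySem.Dict Char Int} {g g' : Char → Int}
    (h : HBInv d g) (hgg : ∀ c, g c = g' c) : HBInv d g' := by
  obtain ⟨h1, h2, h3⟩ := h
  exact ⟨h1, fun c => hgg c ▸ h2 c, fun c => hgg c ▸ h3 c⟩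

lemma IDInv_congr {d : PySem.Dict Char Int} {mis : Int} {f f' : Char → Int}
    (h : IDInv d mis f) (hff : ∀ c, f c = f' c) : IDInv d mis f' := by
  obtain ⟨h1, h2, h3, h4⟩ := h
  exact ⟨h1, fun c => hff c ▸ h2 c, fun c hc => hff c ▸ h3 c hc, h4⟩

lemma HBInv_empty : HBInv PySem.Dict.empty (fun _ => 0) := by
  refine ⟨by simp [PySem.Dict.keys_empty], fun c => le_refl 0,
    fun c => by simp [PySem.Dict.get?_empty]⟩

lemma HBInv_foldl_bump :
    ∀ (l : List Char) (d : PySem.Dict Char Int) (g : Char → Int), HBInv d g →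
      HBInv (l.foldl pvBump d) (fun x => g x + l.count x) := by
  intro l
  induction l with
  | nil => intro d g h; simpa using h
  | cons a l ih =>
    intro d g h
    have := ih (pvBump d a) _ (HBInv_bump h a)
    rw [List.foldl_cons]
    refine HBInv_congr this ?_
    intro x
    by_cases hxa : x = a
    · simp [hxa, List.count_cons]; omega
    · simp [hxa, List.count_cons]
      exact fun h => hxa h.symm

lemma IDInv_shift {d : PySem.Dict Char Int} {mis : Int} {f : Char → Int}
    (h : IDInv d mis f) (c : Char) {delta : Int} (hdel : delta ≠ 0) :
    IDInv (pvShift (d, mis) c delta).1 (pvShift (d, mis) c delta).2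
      (fun x => if x = c then f x + delta else f x) := by
  obtain ⟨hnd, hgetD, hout, hmis⟩ := h
  unfold pvShift
  simp only
  by_cases hc : c ∈ d.keys
  · have hcont : d.contains c = true := (PySem.Dict.contains_iff_mem_keys d c).mpr hc
    refine ⟨by rw [PySem.Dict.keys_insert_of_contains d _ hcont]; exact hnd, ?_, ?_, ?_⟩
    · intro x
      rw [PySem.Dict.getD_insert]
      by_cases hxc : x = c <;> simp [hxc, hgetD]
    · intro x hx
      rw [PySem.Dict.keys_insert_of_contains d _ hcont] at hx
      have hxc : x ≠ c := fun he => hx (he ▸ hc)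
      simp only [if_neg hxc]
      exact hout x hx
    · rw [PySem.Dict.keys_insert_of_contains d _ hcont]
      have hupd := filter_length_update d.keys hnd hc
        (fun k => !(d.getD k 0 == 0))
        (fun k => !((d.insert c (d.getD c 0 + delta)).getD k 0 == 0))
        (fun x hxc => by simp only [PySem.Dict.getD_insert, if_neg hxc])
      rw [hupd, ← hmis]
      beta_reduce
      rw [PySem.Dict.getD_insert, if_pos rfl]
      by_cases h0 : d.getD c 0 = 0
      · have hbt : ((d.getD c 0 + delta == 0) : Bool) = false := by
          rw [h0]; simpa using hdel
        simp [hbt, h0, hdel]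
      · by_cases hn0 : d.getD c 0 + delta = 0
        · simp [hn0, h0]
        · simp [hn0, h0]
  · have hcont : d.contains c = false := by
      rw [← Bool.not_eq_true]
      exact fun hcc => hc ((PySem.Dict.contains_iff_mem_keys d c).mp hcc)
    have hf0 : f c = 0 := hout c hc
    have hgd0 : d.getD c 0 = 0 := by rw [hgetD c, hf0]
    rw [hgd0, if_pos rfl]
    refine ⟨?_, ?_, ?_, ?_⟩
    · rw [PySem.Dict.keys_insert_of_not_contains d _ hcont]
      rw [List.nodup_append]
      refine ⟨hnd, by simp, ?_⟩
      intro x hx y hy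
      rw [List.mem_singleton] at hy
      subst hy
      exact fun hxy => hc (hxy ▸ hx)
    · intro x
      rw [PySem.Dict.getD_insert]
      by_cases hxc : x = c <;> simp [hxc, hgetD, hf0]
    · intro x hx
      rw [PySem.Dict.keys_insert_of_not_contains d _ hcont] at hx
      rw [List.mem_append, List.mem_singleton] at hx
      push_neg at hx
      beta_reduce
      rw [if_neg hx.2]
      exact hout x hx.1
    · rw [PySem.Dict.keys_insert_of_not_contains d _ hcont, List.filter_append, hmis]
      have hfil : d.keys.filter (fun k => !((d.insert c (0 + delta)).getD k 0 == 0)) =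
          d.keys.filter (fun k => !(d.getD k 0 == 0)) := by
        refine List.filter_congr (fun x hx => ?_)
        have hxc : x ≠ c := fun he => hc (he ▸ hx)
        rw [PySem.Dict.getD_insert, if_neg hxc]
      rw [hfil]
      have hgd : (d.insert c (0 + delta)).getD c 0 = 0 + delta := by
        rw [PySem.Dict.getD_insert, if_pos rfl]
      simp [hgd, hdel]

lemma IDInv_zero_iff {d : PySem.Dict Char Int} {mis : Int} {f : Char → Int}
    (h : IDInv d mis f) : (mis = 0 ↔ ∀ c, f c = 0) := by
  obtain ⟨hnd, hgetD, hout, hmis⟩ := h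
  rw [hmis]
  constructor
  · intro h0 c
    have hlen : (d.keys.filter (fun k => !(d.getD k 0 == 0))).length = 0 := by exact_mod_cast h0
    have hnil := List.length_eq_zero_iff.mp hlen
    by_cases hc : c ∈ d.keys
    · by_contra hfc
      have hpc : (fun k => !(d.getD k 0 == 0)) c = true := by
        simp [hgetD c, hfc]
      have : c ∈ d.keys.filter (fun k => !(d.getD k 0 == 0)) := List.mem_filter.mpr ⟨hc, hpc⟩
      rw [hnil] at this
      exact absurd this (List.not_mem_nil)
    · exact hout c hc
  · intro hall
    have : d.keys.filter (fun k => !(d.getD k 0 == 0)) = [] := by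
      refine List.filter_eq_nil_iff.mpr (fun k _ => ?_)
      simp [hgetD k, hall k]
    rw [this]
    rfl

lemma getD_foldl_insert_sub_one :
    ∀ (l : List Char) (d : PySem.Dict Char Int) (v : Char),
      (l.foldl (fun d c => d.insert c (d.getD c 0 - 1)) d).getD v 0 = d.getD v 0 - l.count v := by
  intro l
  induction l with
  | nil => intro d v; simp
  | cons a l ih =>
    intro d v
    rw [List.foldl_cons, ih, PySem.Dict.getD_insert, List.count_cons]
    by_cases hva : v = a
    · simp [hva]; omega
    · simp [hva]
      intro h
      exact absurd h.symm hva

lemma map_snd_zip_of_le :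
    ∀ (as : List Char) (bs : List Char), as.length ≤ bs.length →
      (as.zip bs).map Prod.snd = bs.take as.length := by
  intro as
  induction as with
  | nil => intro bs _; simp
  | cons a as ih =>
    intro bs h
    cases bs with
    | nil => simp at h
    | cons b bs => simpa using ih bs (by simpa using h)

lemma IDInv_init (as : List Char) :
    IDInv (as.foldl (fun d c => d.insert c (d.getD c 0 - 1))
        (PySem.Dict.empty : PySem.Dict Char Int))
      ((((as.foldl (fun d c => d.insert c (d.getD c 0 - 1))
        (PySem.Dict.empty : PySem.Dict Char Int)).values.filter
        (fun v => !(v == 0))).length : Int))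
      (fun c => -((as.count c : Nat) : Int)) := by
  have hnd : (as.foldl (fun d c => d.insert c (d.getD c 0 - 1))
      (PySem.Dict.empty : PySem.Dict Char Int)).keys.Nodup :=
    PySem.Dict.nodup_keys_foldl_insert as _ _ (by simp [PySem.Dict.keys_empty])
  refine ⟨hnd, ?_, ?_, ?_⟩
  · intro c
    rw [getD_foldl_insert_sub_one]
    simp
  · intro c hc
    rw [PySem.Dict.keys_foldl_insert] at hc
    simp only [PySem.Dict.keys_empty, PySem.Set.update_nil_left] at hc
    have hna : c ∉ as := fun h => hc ((PySem.Set.mem_ofList _ _).mpr h)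
    simp [List.count_eq_zero_of_not_mem hna]
  · rw [PySem.Dict.values_eq_map_keys _ hnd 0, List.filter_map, List.length_map]
    simp [Function.comp_def]

lemma IDInv_foldl_shift :
    ∀ (l : List Char) (d : PySem.Dict Char Int) (mis : Int) (f : Char → Int), IDInv d mis f →
      IDInv (l.foldl (fun st c => pvShift st c 1) (d, mis)).1
        (l.foldl (fun st c => pvShift st c 1) (d, mis)).2
        (fun x => f x + l.count x) := by
  intro l
  induction l with
  | nil => intro d mis f h; simpa using h
  | cons a l ih =>
    intro d mis f h
    have hstep := IDInv_shift h a (delta := 1) (by omega)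
    rw [List.foldl_cons]
    have := ih (pvShift (d, mis) a 1).1 (pvShift (d, mis) a 1).2 _ hstep
    refine IDInv_congr (by simpa using this) ?_
    intro x
    by_cases hxa : x = a
    · simp [hxa, List.count_cons]; omega
    · simp [hxa, List.count_cons]
      exact fun h => absurd h.symm hxa

lemma window_count (y : Char) (ys : List Char) (n : Nat) (h : n < (y :: ys).length) (x : Char) :
    ((ys.take n).count x : Int) =
      (((y :: ys).take n).count x : Int) + (if (y :: ys)[n] = x then 1 else 0)
        - (if y = x then 1 else 0) := by
  have e1 : (y :: ys).take (n + 1) = y :: ys.take n := List.take_succ_cons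
  have e2 : (y :: ys).take (n + 1) = (y :: ys).take n ++ [(y :: ys)[n]] := by
    rw [List.take_succ, List.getElem?_eq_getElem h]
    rfl
  have e3 := congrArg (List.count x) (e1.symm.trans e2)
  rw [List.count_cons, List.count_append, List.count_cons, List.count_nil] at e3
  by_cases h1 : y = x
  · subst h1
    by_cases h2 : (y :: ys)[n] = y <;> simp [h2] at e3 ⊢ <;> omega
  · by_cases h2 : (y :: ys)[n] = x <;> simp [h1, h2] at e3 ⊢ <;> omega


lemma slide_eq (hA : PySem.Dict Char Int) (ac : Char → Int) (hHA : HBInv hA ac) :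
    ∀ (ys : List Char) (n : Nat) (dB dD : PySem.Dict Char Int) (mis cnt : Int),
      HBInv dB (fun c => ((ys.take n).count c : Int)) →
      IDInv dD mis (fun c => ((ys.take n).count c : Int) - ac c) →
      ((List.zip (ys.drop n) ys).foldl (pvStepA hA) (dB, cnt)).2 =
        ((List.zip (ys.drop n) ys).foldl pvStepB ((dD, mis), cnt)).2 := by
  intro ys
  induction ys with
  | nil => intro n dB dD mis cnt _ _; simp
  | cons y ys ih =>
    intro n dB dD mis cnt hHB hID
    by_cases hlen : n < (y :: ys).length
    · have hdrop : (y :: ys).drop n = (y :: ys)[n] :: ys.drop n := by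
        rw [List.drop_eq_getElem_cons hlen, List.drop_succ_cons]
      set z := (y :: ys)[n] with hz
      rw [hdrop, List.zip_cons_cons, List.foldl_cons, List.foldl_cons]
      have hbump := HBInv_bump hHB z
      have hy1 : (1 : Int) ≤ (if (y : Char) = z then (((y :: ys).take n).count y : Int) + 1
          else (((y :: ys).take n).count y : Int)) := by
        have hw := window_count y ys n hlen y
        rw [← hz, if_pos rfl] at hw
        have h0 : (0 : Int) ≤ ((ys.take n).count y : Int) := Int.natCast_nonneg _
        by_cases hyz : (y : Char) = z
        · rw [if_pos hyz]
          rw [if_pos hyz.symm] at hw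
          omega
        · rw [if_neg hyz]
          rw [if_neg (fun hh => hyz hh.symm)] at hw
          omega
      have hdropInv := HBInv_drop hbump (c := y) (by beta_reduce; exact hy1)
      have hHB' : HBInv (pvDrop (pvBump dB z) y) (fun c => ((ys.take n).count c : Int)) := by
        refine HBInv_congr hdropInv ?_
        intro x
        have hw := window_count y ys n hlen x
        rw [← hz] at hw
        beta_reduce
        by_cases h1 : x = y
        · rw [if_pos h1]
          by_cases h2 : x = z
          · rw [if_pos h2]; rw [if_pos h2.symm, if_pos h1.symm] at hw; omega
          · rw [if_neg h2]; rw [if_neg (fun hh => h2 hh.symm), if_pos h1.symm] at hw; omega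
        · rw [if_neg h1]
          by_cases h2 : x = z
          · rw [if_pos h2]; rw [if_pos h2.symm, if_neg (fun hh => h1 hh.symm)] at hw; omega
          · rw [if_neg h2]; rw [if_neg (fun hh => h2 hh.symm), if_neg (fun hh => h1 hh.symm)] at hw; omega
      have hsh1 := IDInv_shift hID z (delta := 1) (by omega)
      have hsh2 := IDInv_shift hsh1 y (delta := (-1)) (by omega)
      have hID' : IDInv (pvShift (pvShift (dD, mis) z 1) y (-1)).1
          (pvShift (pvShift (dD, mis) z 1) y (-1)).2
          (fun c => ((ys.take n).count c : Int) - ac c) := by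
        refine IDInv_congr (by simpa using hsh2) ?_
        intro x
        have hw := window_count y ys n hlen x
        rw [← hz] at hw
        beta_reduce
        by_cases h1 : x = y
        · rw [if_pos h1]
          by_cases h2 : x = z
          · rw [if_pos h2]; rw [if_pos h2.symm, if_pos h1.symm] at hw; omega
          · rw [if_neg h2]; rw [if_neg (fun hh => h2 hh.symm), if_pos h1.symm] at hw; omega
        · rw [if_neg h1]
          by_cases h2 : x = z
          · rw [if_pos h2]; rw [if_pos h2.symm, if_neg (fun hh => h1 hh.symm)] at hw; omega
          · rw [if_neg h2]; rw [if_neg (fun hh => h2 hh.symm), if_neg (fun hh => h1 hh.symm)] at hw; omega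
      have hcond : (pvDictEq hA (pvDrop (pvBump dB z) y) = true) ↔
          ((pvShift (pvShift (dD, mis) z 1) y (-1)).2 = 0) := by
        rw [dictEq_iff hHA hHB', IDInv_zero_iff hID']
        constructor <;> intro h c <;> have := h c <;> omega
      have hcnt : (if pvDictEq hA (pvDrop (pvBump dB z) y) then cnt + 1 else cnt) =
          (if (pvShift (pvShift (dD, mis) z 1) y (-1)).2 = 0 then cnt + 1 else cnt) := by
        by_cases hq : pvDictEq hA (pvDrop (pvBump dB z) y)
        · rw [if_pos hq, if_pos (hcond.mp hq)]
        · rw [if_neg hq, if_neg (fun hh => hq (hcond.mpr hh))]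
      show ((List.zip (ys.drop n) ys).foldl (pvStepA hA)
          (pvDrop (pvBump dB z) y,
            if pvDictEq hA (pvDrop (pvBump dB z) y) then cnt + 1 else cnt)).2 = _
      rw [hcnt]
      exact ih n _ _ _ _ hHB' hID'
    · have hdrop : (y :: ys).drop n = [] := List.drop_eq_nil_of_le (by omega)
      rw [hdrop]
      simp
set_option maxHeartbeats 2000000 in
theorem core (A B : String) (hpre : A.toList.length ≤ B.toList.length) :
    solve A B = solve_alt A B := by
  simp only [solve, solve_alt]
  rw [PySem.List.foldl_prod_mk (fun (d : PySem.Dict Char Int) (ab : Char × Char) => pvBump d ab.1)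
      (fun (d : PySem.Dict Char Int) (ab : Char × Char) => pvBump d ab.2)]
  rw [← List.foldl_map (f := (Prod.fst : Char × Char → Char)) (g := pvBump),
      ← List.foldl_map (f := (Prod.snd : Char × Char → Char)) (g := pvBump)]
  rw [List.map_fst_zip hpre, map_snd_zip_of_le _ _ hpre]
  have hHA : HBInv (A.toList.foldl pvBump PySem.Dict.empty)
      (fun c => ((A.toList.count c : Nat) : Int)) := by
    refine HBInv_congr (HBInv_foldl_bump A.toList _ _ HBInv_empty) ?_
    intro x
    omega
  have hHB0 : HBInv ((B.toList.take A.toList.length).foldl pvBump PySem.Dict.empty)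
      (fun c => (((B.toList.take A.toList.length).count c : Nat) : Int)) := by
    refine HBInv_congr (HBInv_foldl_bump (B.toList.take A.toList.length) _ _ HBInv_empty) ?_
    intro x
    omega
  have hID1 := IDInv_foldl_shift (B.toList.take A.toList.length) _ _ _ (IDInv_init A.toList)
  have hID1' : IDInv
      ((B.toList.take A.toList.length).foldl (fun st c => pvShift st c 1)
        (A.toList.foldl (fun d c => d.insert c (d.getD c 0 - 1)) (PySem.Dict.empty : PySem.Dict Char Int),
         (((A.toList.foldl (fun d c => d.insert c (d.getD c 0 - 1))
            (PySem.Dict.empty : PySem.Dict Char Int)).values.filter (fun v => !(v == 0))).length : Int))).1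
      ((B.toList.take A.toList.length).foldl (fun st c => pvShift st c 1)
        (A.toList.foldl (fun d c => d.insert c (d.getD c 0 - 1)) (PySem.Dict.empty : PySem.Dict Char Int),
         (((A.toList.foldl (fun d c => d.insert c (d.getD c 0 - 1))
            (PySem.Dict.empty : PySem.Dict Char Int)).values.filter (fun v => !(v == 0))).length : Int))).2
      (fun c => (((B.toList.take A.toList.length).count c : Nat) : Int)
        - ((A.toList.count c : Nat) : Int)) := by
    refine IDInv_congr hID1 ?_
    intro x
    omega
  have hcond0 : (pvDictEq (A.toList.foldl pvBump PySem.Dict.empty)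
        ((B.toList.take A.toList.length).foldl pvBump PySem.Dict.empty) = true) ↔
      (((B.toList.take A.toList.length).foldl (fun st c => pvShift st c 1)
        (A.toList.foldl (fun d c => d.insert c (d.getD c 0 - 1)) (PySem.Dict.empty : PySem.Dict Char Int),
         (((A.toList.foldl (fun d c => d.insert c (d.getD c 0 - 1))
            (PySem.Dict.empty : PySem.Dict Char Int)).values.filter (fun v => !(v == 0))).length : Int))).2 = 0) := by
    rw [dictEq_iff hHA hHB0, IDInv_zero_iff hID1']
    constructor <;> intro h c <;> have := h c <;> omega
  have hcnt : (if pvDictEq (A.toList.foldl pvBump PySem.Dict.empty)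
        ((B.toList.take A.toList.length).foldl pvBump PySem.Dict.empty) then (1 : Int) else 0) =
      (if ((B.toList.take A.toList.length).foldl (fun st c => pvShift st c 1)
        (A.toList.foldl (fun d c => d.insert c (d.getD c 0 - 1)) (PySem.Dict.empty : PySem.Dict Char Int),
         (((A.toList.foldl (fun d c => d.insert c (d.getD c 0 - 1))
            (PySem.Dict.empty : PySem.Dict Char Int)).values.filter (fun v => !(v == 0))).length : Int))).2 = 0
        then (1 : Int) else 0) := by
    by_cases hq : pvDictEq (A.toList.foldl pvBump PySem.Dict.empty)
        ((B.toList.take A.toList.length).foldl pvBump PySem.Dict.empty)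
    · rw [if_pos hq, if_pos (hcond0.mp hq)]
    · rw [if_neg hq, if_neg (fun hh => hq (hcond0.mpr hh))]
  rw [hcnt]
  have := slide_eq (A.toList.foldl pvBump PySem.Dict.empty) _ hHA B.toList A.toList.length
    ((B.toList.take A.toList.length).foldl pvBump PySem.Dict.empty)
    ((B.toList.take A.toList.length).foldl (fun st c => pvShift st c 1)
        (A.toList.foldl (fun d c => d.insert c (d.getD c 0 - 1)) (PySem.Dict.empty : PySem.Dict Char Int),
         (((A.toList.foldl (fun d c => d.insert c (d.getD c 0 - 1))
            (PySem.Dict.empty : PySem.Dict Char Int)).values.filter (fun v => !(v == 0))).length : Int))).1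
    ((B.toList.take A.toList.length).foldl (fun st c => pvShift st c 1)
        (A.toList.foldl (fun d c => d.insert c (d.getD c 0 - 1)) (PySem.Dict.empty : PySem.Dict Char Int),
         (((A.toList.foldl (fun d c => d.insert c (d.getD c 0 - 1))
            (PySem.Dict.empty : PySem.Dict Char Int)).values.filter (fun v => !(v == 0))).length : Int))).2
    (if ((B.toList.take A.toList.length).foldl (fun st c => pvShift st c 1)
        (A.toList.foldl (fun d c => d.insert c (d.getD c 0 - 1)) (PySem.Dict.empty : PySem.Dict Char Int),
         (((A.toList.foldl (fun d c => d.insert c (d.getD c 0 - 1))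
            (PySem.Dict.empty : PySem.Dict Char Int)).values.filter (fun v => !(v == 0))).length : Int))).2 = 0
      then (1 : Int) else 0)
    hHB0 hID1'
  simpa using this

-- ===== VERDICT (by name: the statement is the Claim_ definition above) =====
theorem solve_spec : Claim_equal_solve := by
  intro A B _hdom hpre
  unfold Spec_solve
  exact core A B hpre
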